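-- pv_equiv track=rewrite | github.com/hugo17051989/Bai-tap-Python | homework/bai70.py | xulychuoi
-- ===== SOURCE A (Python) =====
-- def xulychuoi(s):
--     kq = ''
--     chu = 0
--     chu1 = ''
--     so = 0
--     so1 = ''
--     kyhieu = 0
--     kyhieu1 = ''
--     for c in s:
--         if c.isalnum():
--             if c.isalpha():
--                 chu=chu+1
--                 chu1=chu1+c
--             elif c.isnumeric():
--                 so=so+1
--                 so1=so1+c
--         else:
--             kyhieu=kyhieu+1
--             kyhieu1=kyhieu1+c
--     kq = so1+chu1+kyhieu1
--     return so,chu,kyhieu,kq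
-- ===== SOURCE B (Python) =====
-- def xulychuoi(s):
--     # three independent filtering passes instead of one accumulating loop
--     chu1 = ''.join(c for c in s if c.isalpha())
--     so1 = ''.join(c for c in s if c.isnumeric() and not c.isalpha())
--     kyhieu1 = ''.join(c for c in s if not c.isalnum())
--     return len(so1), len(chu1), len(kyhieu1), so1 + chu1 + kyhieu1
-- ===== Notes on version B (the rewrite author's own statement) =====
-- stated objective: simpler
-- what changed: Replaces the single six-accumulator loop with three independent filter passes (one per character class) and derives the counts as the lengths of the filtered strings.
import Mathlib
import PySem

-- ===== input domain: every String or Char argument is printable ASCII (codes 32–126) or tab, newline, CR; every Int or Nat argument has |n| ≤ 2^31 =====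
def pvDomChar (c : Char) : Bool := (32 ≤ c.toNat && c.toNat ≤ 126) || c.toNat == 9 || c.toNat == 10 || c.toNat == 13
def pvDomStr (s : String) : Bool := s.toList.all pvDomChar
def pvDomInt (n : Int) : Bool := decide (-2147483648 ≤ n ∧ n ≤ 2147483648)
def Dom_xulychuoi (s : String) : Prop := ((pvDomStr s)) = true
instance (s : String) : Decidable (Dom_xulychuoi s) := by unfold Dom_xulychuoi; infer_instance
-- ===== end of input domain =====

-- B replaces A's single six-accumulator loop by three independent filter passes; objective: simpler.

-- ===== PORT A =====
-- A's loop: one pass maintaining (chu, chu1, so, so1, kyhieu, kyhieu1).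
-- c.isnumeric() is ported as PySem.Chars.isdigit — exact on the ASCII domain (Dom), where isnumeric = isdigit.
def xulychuoiStep (st : Int × List Char × Int × List Char × Int × List Char) (c : Char) :
    Int × List Char × Int × List Char × Int × List Char :=
  let (chu, chu1, so, so1, kyhieu, kyhieu1) := st
  if PySem.Chars.isalnum c then
    if PySem.Chars.isalpha c then
      (chu + 1, chu1 ++ [c], so, so1, kyhieu, kyhieu1)
    else if PySem.Chars.isdigit c then
      (chu, chu1, so + 1, so1 ++ [c], kyhieu, kyhieu1)
    else
      (chu, chu1, so, so1, kyhieu, kyhieu1)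
  else
    (chu, chu1, so, so1, kyhieu + 1, kyhieu1 ++ [c])

def xulychuoi (s : String) : Int × Int × Int × String :=
  let (_, chu1, so, so1, kyhieu, kyhieu1) :=
    s.toList.foldl xulychuoiStep (0, [], 0, [], 0, [])
  let st := s.toList.foldl xulychuoiStep (0, [], 0, [], 0, [])
  (so, st.1, kyhieu, String.ofList (so1 ++ chu1 ++ kyhieu1))

-- ===== PORT B =====
-- three independent filter passes; counts are the lengths of the filtered lists
def xulychuoi_alt (s : String) : Int × Int × Int × String :=
  let chu1 := s.toList.filter (fun c => PySem.Chars.isalpha c)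
  let so1 := s.toList.filter (fun c => PySem.Chars.isdigit c && !PySem.Chars.isalpha c)
  let kyhieu1 := s.toList.filter (fun c => !PySem.Chars.isalnum c)
  ((so1.length : Int), (chu1.length : Int), (kyhieu1.length : Int),
    String.ofList (so1 ++ chu1 ++ kyhieu1))

-- ===== PRECONDITION & SPEC =====
def Spec_xulychuoi (s : String) (out : Int × Int × Int × String) : Prop := out = xulychuoi_alt s
instance (s : String) (out : Int × Int × Int × String) : Decidable (Spec_xulychuoi s out) := by unfold Spec_xulychuoi; infer_instance

-- ===== CLAIM (what is proved, stated in full; the proofs are below) =====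
def Claim_equal_xulychuoi : Prop := ∀ (s : String), Dom_xulychuoi s → Spec_xulychuoi s (xulychuoi s)

-- ===== LEMMAS AND PROOFS =====

-- every ASCII-exact character: alnum means alpha-or-digit (true for all of Unicode in PySem's model)
theorem isalnum_eq (c : Char) :
    PySem.Chars.isalnum c = (PySem.Chars.isalpha c || PySem.Chars.isdigit c) := by
  simp [PySem.Chars.isalnum, PySem.Chars.isalpha, PySem.Chars.isdigit]

-- loop invariant: the fold from arbitrary accumulators appends the three filters and adds the three counts
theorem foldl_step_eq (cs : List Char)
    (chu : Int) (chu1 : List Char) (so : Int) (so1 : List Char)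
    (kyhieu : Int) (kyhieu1 : List Char) :
    cs.foldl xulychuoiStep (chu, chu1, so, so1, kyhieu, kyhieu1) =
      (chu + (cs.filter (fun c => PySem.Chars.isalpha c)).length,
       chu1 ++ cs.filter (fun c => PySem.Chars.isalpha c),
       so + (cs.filter (fun c => PySem.Chars.isdigit c && !PySem.Chars.isalpha c)).length,
       so1 ++ cs.filter (fun c => PySem.Chars.isdigit c && !PySem.Chars.isalpha c),
       kyhieu + (cs.filter (fun c => !PySem.Chars.isalnum c)).length,
       kyhieu1 ++ cs.filter (fun c => !PySem.Chars.isalnum c)) := by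
  have hsym : (fun c => !PySem.Chars.isalnum c)
      = (fun c => !PySem.Chars.isalpha c && !PySem.Chars.isdigit c) := by
    funext c; simp [isalnum_eq]
  induction cs generalizing chu chu1 so so1 kyhieu kyhieu1 with
  | nil => simp
  | cons c cs ih =>
    simp only [List.foldl_cons, xulychuoiStep, isalnum_eq, List.filter_cons]
    by_cases ha : PySem.Chars.isalpha c = true <;>
      by_cases hd : PySem.Chars.isdigit c = true <;>
        simp [ha, hd, ih, hsym, add_comm, add_assoc, add_left_comm]

theorem xulychuoi_spec : Claim_equal_xulychuoi := by
  intro s _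
  unfold Spec_xulychuoi xulychuoi xulychuoi_alt
  simp [foldl_step_eq]
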